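-- pv_equiv track=rewrite | github.com/airel-ee/tic-python | src/tic/encoding.py | update_checksum
-- ===== SOURCE A (Python) =====
-- def update_checksum(crc, data):
--     for byte in data:
--         crc = crc ^ (byte << 8)
--
--         for i in range(8):
--             if crc & 0x8000 != 0:
--                 crc = ((crc << 1) ^ 0x1021) & 0xFFFF
--             else:
--                 crc = (crc << 1) & 0xFFFF
--
--     return crc
-- ===== SOURCE B (Python) =====
-- def _make_table():
--     table = []
--     for high in range(256):
--         e = high << 8
--         for _ in range(8):
--             if e & 0x8000:
--                 e = ((e << 1) ^ 0x1021) & 0xFFFF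
--             else:
--                 e = (e << 1) & 0xFFFF
--         table.append(e)
--     return table
--
--
-- _CRC_TABLE = _make_table()
--
--
-- def update_checksum(crc, data):
--     for byte in data:
--         crc = ((crc << 8) & 0xFFFF) ^ _CRC_TABLE[((crc >> 8) ^ byte) & 0xFF]
--     return crc
-- ===== Notes on version B (the rewrite author's own statement) =====
-- stated objective: faster
-- what changed: B precomputes the 256-entry CRC-16/CCITT table once and updates the checksum with one table lookup and one shift/xor per byte, instead of A's 8-iteration bit-by-bit inner loop per byte.
import Mathlib
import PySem

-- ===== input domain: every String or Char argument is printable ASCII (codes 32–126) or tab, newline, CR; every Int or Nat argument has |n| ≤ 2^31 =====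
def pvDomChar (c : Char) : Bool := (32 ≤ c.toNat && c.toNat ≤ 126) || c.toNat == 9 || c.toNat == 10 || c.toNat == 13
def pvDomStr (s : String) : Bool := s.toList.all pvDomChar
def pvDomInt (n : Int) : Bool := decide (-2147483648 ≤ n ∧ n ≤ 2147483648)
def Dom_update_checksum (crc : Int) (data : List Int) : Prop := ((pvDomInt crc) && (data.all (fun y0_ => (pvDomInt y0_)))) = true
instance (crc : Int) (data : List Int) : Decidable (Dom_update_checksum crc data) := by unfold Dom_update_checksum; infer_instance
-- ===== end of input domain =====

-- B replaces A's 8-iteration bit-by-bit inner loop by a 256-entry CRC table built once,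
-- one table lookup per data byte (objective: faster, constant-factor).

-- ===== PORT A =====
def update_checksum (crc : Int) (data : List Int) : Int :=
  data.foldl (fun (crc byte : Int) =>
    let crc1 := PySem.Int.bxor crc (byte <<< (8 : Nat))
    (PySem.List.pyRange 0 8 1).foldl (fun crc _ =>
      if PySem.Int.band crc 32768 ≠ 0 then
        PySem.Int.band (PySem.Int.bxor (crc <<< (1 : Nat)) 4129) 65535
      else
        PySem.Int.band (crc <<< (1 : Nat)) 65535) crc1) crc

-- ===== PORT B =====
-- Source B's _make_table inner body: the 8 shift/xor steps applied to high << 8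
def pvCrcEntry (high : Int) : Int :=
  (PySem.List.pyRange 0 8 1).foldl (fun e _ =>
    if PySem.Int.band e 32768 ≠ 0 then
      PySem.Int.band (PySem.Int.bxor (e <<< (1 : Nat)) 4129) 65535
    else
      PySem.Int.band (e <<< (1 : Nat)) 65535) (high <<< (8 : Nat))

def pvCrcTable : List Int :=
  (PySem.List.pyRange 0 256 1).foldl (fun table high => table ++ [pvCrcEntry high]) []

def update_checksum_alt (crc : Int) (data : List Int) : Int :=
  data.foldl (fun (crc byte : Int) =>
    PySem.Int.bxor (PySem.Int.band (crc <<< (8 : Nat)) 65535)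
      (PySem.List.pyGetD pvCrcTable
        (PySem.Int.band (PySem.Int.bxor (crc >>> (8 : Nat)) byte) 255) 0)) crc

-- ===== PRECONDITION & SPEC =====
def Spec_update_checksum (crc : Int) (data : List Int) (out : Int) : Prop := out = update_checksum_alt crc data
instance (crc : Int) (data : List Int) (out : Int) : Decidable (Spec_update_checksum crc data out) := by unfold Spec_update_checksum; infer_instance

-- ===== CLAIM (what is proved, stated in full; the proofs are below) =====
def Claim_equal_update_checksum : Prop := ∀ (crc : Int) (data : List Int), Dom_update_checksum crc data → Spec_update_checksum crc data (update_checksum crc data)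

-- ===== LEMMAS AND PROOFS =====

-- the shared one-bit CRC step on Int (exactly the inner-loop body of both ports)
def pvStepI (c : Int) : Int :=
  if PySem.Int.band c 32768 ≠ 0 then
    PySem.Int.band (PySem.Int.bxor (c <<< (1 : Nat)) 4129) 65535
  else
    PySem.Int.band (c <<< (1 : Nat)) 65535

-- the same step on 16-bit Nat residues
def pvStepN (c : Nat) : Nat :=
  if c &&& 32768 ≠ 0 then ((c <<< 1) ^^^ 4129) &&& 65535 else (c <<< 1) &&& 65535

def pvIterN : Nat → Nat → Nat
  | 0, c => c
  | n + 1, c => pvIterN n (pvStepN c)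

theorem pvMask16 (m : Nat) : m &&& 65535 = m % 65536 := by
  have h := Nat.and_two_pow_sub_one_eq_mod m 16
  norm_num at h
  exact h

theorem pvMask8 (m : Nat) : m &&& 255 = m % 256 := by
  have h := Nat.and_two_pow_sub_one_eq_mod m 8
  norm_num at h
  exact h

-- ---------- generic Nat bit facts ----------

theorem pvXorAddOfAndZero (a : Nat) : ∀ b : Nat, a &&& b = 0 → a ^^^ b = a + b := by
  induction a using Nat.strong_induction_on with
  | _ a ih =>
    intro b h
    rcases Nat.eq_zero_or_pos a with ha | ha
    · simp [ha]
    · have h1 : ∀ m : Nat, m &&& 1 = m % 2 := fun m => Nat.and_one_is_mod m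
      have hdiv : (a &&& b) / 2 = a / 2 &&& b / 2 := Nat.and_div_two
      have hih := ih (a / 2) (by omega) (b / 2) (by omega)
      have hx2 : (a ^^^ b) / 2 = a / 2 ^^^ b / 2 := Nat.xor_div_two
      have hand1 : (a % 2) &&& (b % 2) = 0 := by
        rw [← h1, ← h1]
        calc (a &&& 1) &&& (b &&& 1) = a &&& (1 &&& (b &&& 1)) := Nat.and_assoc _ _ _
          _ = a &&& ((b &&& 1) &&& 1) := by rw [Nat.and_comm 1 (b &&& 1)]
          _ = a &&& (b &&& (1 &&& 1)) := by rw [Nat.and_assoc]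
          _ = a &&& (b &&& 1) := by rw [(by decide : (1 : Nat) &&& 1 = 1)]
          _ = (a &&& b) &&& 1 := (Nat.and_assoc a b 1).symm
          _ = 0 := by rw [h]; rfl
      have hx0 : (a ^^^ b) % 2 = (a % 2) ^^^ (b % 2) := by
        rw [← h1, ← h1, ← h1, Nat.and_xor_distrib_right]
      have hor : a % 2 = 0 ∨ b % 2 = 0 := by
        rcases Nat.mod_two_eq_zero_or_one a with h2 | h2 <;>
          rcases Nat.mod_two_eq_zero_or_one b with h3 | h3 <;>
            simp [h2, h3] at hand1 ⊢
      have hx0' : (a ^^^ b) % 2 = a % 2 + b % 2 := by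
        rcases Nat.mod_two_eq_zero_or_one a with h2 | h2 <;>
          rcases Nat.mod_two_eq_zero_or_one b with h3 | h3 <;>
            rw [hx0, h2, h3] <;> first | rfl | omega
      omega

theorem pvCompl (k r : Nat) (h : r < 2 ^ k) : (2 ^ k - 1) ^^^ r = 2 ^ k - 1 - r := by
  have hsr : ((2 ^ k - 1) ^^^ r) &&& r = 0 := by
    apply Nat.eq_of_testBit_eq
    intro i
    simp only [Nat.testBit_and, Nat.testBit_xor, Nat.testBit_two_pow_sub_one, Nat.zero_testBit]
    by_cases hik : i < k
    · simp only [hik, decide_true]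
      cases hri : r.testBit i <;> simp
    · have hri : r.testBit i = false :=
        Nat.testBit_lt_two_pow (lt_of_lt_of_le h (Nat.pow_le_pow_right (by norm_num) (by omega)))
      simp [hri]
  have hadd := pvXorAddOfAndZero _ _ hsr
  rw [Nat.xor_assoc, Nat.xor_self, Nat.xor_zero] at hadd
  omega

theorem pvNatXorMod (m n k : Nat) : (m ^^^ n) % 2 ^ k = m % 2 ^ k ^^^ n % 2 ^ k := by
  rw [← Nat.and_two_pow_sub_one_eq_mod, ← Nat.and_two_pow_sub_one_eq_mod,
    ← Nat.and_two_pow_sub_one_eq_mod, Nat.and_xor_distrib_right]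

theorem pvShiftLeftXor (a b k : Nat) : (a ^^^ b) <<< k = a <<< k ^^^ b <<< k := by
  apply Nat.eq_of_testBit_eq
  intro i
  simp only [Nat.testBit_shiftLeft, Nat.testBit_xor]
  by_cases h : k ≤ i <;> simp [h]

theorem pvXorCancel (A B t : Nat) : (A ^^^ t) ^^^ (B ^^^ t) = A ^^^ B := by
  rw [Nat.xor_assoc, Nat.xor_comm B t, ← Nat.xor_assoc t t B, Nat.xor_self, Nat.zero_xor]

theorem pvXorPull (A B t : Nat) : (A ^^^ B) ^^^ t = (A ^^^ t) ^^^ B := by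
  rw [Nat.xor_assoc, Nat.xor_comm B t, ← Nat.xor_assoc]

theorem pvComplXor (k r s : Nat) (hr : r < 2 ^ k) (hs : s < 2 ^ k) :
    (2 ^ k - 1 - r) ^^^ s = 2 ^ k - 1 - (r ^^^ s) := by
  rw [← pvCompl k r hr, ← pvCompl k (r ^^^ s) (Nat.xor_lt_two_pow hr hs), Nat.xor_assoc]

-- ---------- Int band/bxor reduced to Nat residues ----------

theorem pvBandMask16 (x : Int) : PySem.Int.band x 65535 = x % 65536 := by
  have hm : ∀ m : Nat, m &&& 65535 = m % 65536 := pvMask16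
  simp only [PySem.Int.band]
  by_cases hx : 0 ≤ x
  · rw [if_pos hx, if_pos (by norm_num : (0:Int) ≤ 65535)]
    have : (65535 : Int).toNat = 65535 := rfl
    rw [this, hm]
    omega
  · rw [if_neg hx, if_pos (by norm_num : (0:Int) ≤ 65535)]
    have : (65535 : Int).toNat = 65535 := rfl
    rw [this, Nat.and_comm, hm]
    omega

theorem pvBandMask8 (x : Int) : PySem.Int.band x 255 = x % 256 := by
  have hm : ∀ m : Nat, m &&& 255 = m % 256 := pvMask8
  simp only [PySem.Int.band]
  by_cases hx : 0 ≤ x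
  · rw [if_pos hx, if_pos (by norm_num : (0:Int) ≤ 255)]
    have : (255 : Int).toNat = 255 := rfl
    rw [this, hm]
    omega
  · rw [if_neg hx, if_pos (by norm_num : (0:Int) ≤ 255)]
    have : (255 : Int).toNat = 255 := rfl
    rw [this, Nat.and_comm, hm]
    omega

theorem pvBxorEmod16 (x y : Int) :
    (PySem.Int.bxor x y) % 65536 = (((x % 65536).toNat ^^^ (y % 65536).toNat : Nat) : Int) := by
  have hmod : ∀ m n : Nat, (m ^^^ n) % 65536 = m % 65536 ^^^ n % 65536 := by
    intro m n
    have := pvNatXorMod m n 16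
    norm_num at this
    exact this
  have hcompl : ∀ r : Nat, r < 65536 → 65535 ^^^ r = 65535 - r := by
    intro r hr
    have := pvCompl 16 r (by norm_num; omega)
    norm_num at this
    exact this
  have hcx : ∀ r s : Nat, r < 65536 → s < 65536 → (65535 - r) ^^^ s = 65535 - (r ^^^ s) := by
    intro r s hr hs
    have := pvComplXor 16 r s (by norm_num; omega) (by norm_num; omega)
    norm_num at this
    exact this
  simp only [PySem.Int.bxor]
  by_cases hx : 0 ≤ x <;> by_cases hy : 0 ≤ y
  · rw [if_pos hx, if_pos hy]
    have h1 : ((x.toNat ^^^ y.toNat : Nat) : Int) % 65536 = (((x.toNat ^^^ y.toNat) % 65536 : Nat) : Int) := by omega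
    rw [h1, hmod]
    have h2 : (x % 65536).toNat = x.toNat % 65536 := by omega
    have h3 : (y % 65536).toNat = y.toNat % 65536 := by omega
    rw [h2, h3]
  · rw [if_pos hx, if_neg hy]
    set m := (-y - 1).toNat with hmdef
    have hy' : y = -(m : Int) - 1 := by omega
    have h1 : (-((x.toNat ^^^ m : Nat) : Int) - 1) % 65536 =
        ((65535 - (x.toNat ^^^ m) % 65536 : Nat) : Int) := by omega
    rw [h1, hmod]
    have h2 : (x % 65536).toNat = x.toNat % 65536 := by omega
    have h3 : (y % 65536).toNat = 65535 - m % 65536 := by omega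
    rw [h2, h3]
    congr 1
    rw [Nat.xor_comm (x.toNat % 65536) (65535 - m % 65536),
      hcx (m % 65536) (x.toNat % 65536) (by omega) (by omega),
      Nat.xor_comm (m % 65536) (x.toNat % 65536)]
  · rw [if_neg hx, if_pos hy]
    set m := (-x - 1).toNat with hmdef
    have hx' : x = -(m : Int) - 1 := by omega
    have h1 : (-((m ^^^ y.toNat : Nat) : Int) - 1) % 65536 =
        ((65535 - (m ^^^ y.toNat) % 65536 : Nat) : Int) := by omega
    rw [h1, hmod]
    have h2 : (x % 65536).toNat = 65535 - m % 65536 := by omega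
    have h3 : (y % 65536).toNat = y.toNat % 65536 := by omega
    rw [h2, h3]
    congr 1
    rw [hcx (m % 65536) (y.toNat % 65536) (by omega) (by omega)]
  · rw [if_neg hx, if_neg hy]
    set m := (-x - 1).toNat with hmdef
    set n := (-y - 1).toNat with hndef
    have h1 : ((m ^^^ n : Nat) : Int) % 65536 = (((m ^^^ n) % 65536 : Nat) : Int) := by omega
    rw [h1, hmod]
    have h2 : (x % 65536).toNat = 65535 - m % 65536 := by omega
    have h3 : (y % 65536).toNat = 65535 - n % 65536 := by omega
    rw [h2, h3]
    congr 1
    rw [hcx (m % 65536) (65535 - n % 65536) (by omega) (by omega),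
      Nat.xor_comm (m % 65536) (65535 - n % 65536),
      hcx (n % 65536) (m % 65536) (by omega) (by omega)]
    have h4 : n % 65536 ^^^ m % 65536 = m % 65536 ^^^ n % 65536 := Nat.xor_comm _ _
    rw [h4]
    have h5 : m % 65536 ^^^ n % 65536 < 65536 := by
      have := Nat.xor_lt_two_pow (x := m % 65536) (y := n % 65536) (n := 16) (by norm_num; omega) (by norm_num; omega)
      norm_num at this
      omega
    omega

theorem pvBxorEmod8 (x y : Int) :
    (PySem.Int.bxor x y) % 256 = (((x % 256).toNat ^^^ (y % 256).toNat : Nat) : Int) := by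
  have hmod : ∀ m n : Nat, (m ^^^ n) % 256 = m % 256 ^^^ n % 256 := by
    intro m n
    have := pvNatXorMod m n 8
    norm_num at this
    exact this
  have hcx : ∀ r s : Nat, r < 256 → s < 256 → (255 - r) ^^^ s = 255 - (r ^^^ s) := by
    intro r s hr hs
    have := pvComplXor 8 r s (by norm_num; omega) (by norm_num; omega)
    norm_num at this
    exact this
  simp only [PySem.Int.bxor]
  by_cases hx : 0 ≤ x <;> by_cases hy : 0 ≤ y
  · rw [if_pos hx, if_pos hy]
    have h1 : ((x.toNat ^^^ y.toNat : Nat) : Int) % 256 = (((x.toNat ^^^ y.toNat) % 256 : Nat) : Int) := by omega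
    rw [h1, hmod]
    have h2 : (x % 256).toNat = x.toNat % 256 := by omega
    have h3 : (y % 256).toNat = y.toNat % 256 := by omega
    rw [h2, h3]
  · rw [if_pos hx, if_neg hy]
    set m := (-y - 1).toNat with hmdef
    have h1 : (-((x.toNat ^^^ m : Nat) : Int) - 1) % 256 =
        ((255 - (x.toNat ^^^ m) % 256 : Nat) : Int) := by omega
    rw [h1, hmod]
    have h2 : (x % 256).toNat = x.toNat % 256 := by omega
    have h3 : (y % 256).toNat = 255 - m % 256 := by omega
    rw [h2, h3]
    congr 1
    rw [Nat.xor_comm (x.toNat % 256) (255 - m % 256),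
      hcx (m % 256) (x.toNat % 256) (by omega) (by omega),
      Nat.xor_comm (m % 256) (x.toNat % 256)]
  · rw [if_neg hx, if_pos hy]
    set m := (-x - 1).toNat with hmdef
    have h1 : (-((m ^^^ y.toNat : Nat) : Int) - 1) % 256 =
        ((255 - (m ^^^ y.toNat) % 256 : Nat) : Int) := by omega
    rw [h1, hmod]
    have h2 : (x % 256).toNat = 255 - m % 256 := by omega
    have h3 : (y % 256).toNat = y.toNat % 256 := by omega
    rw [h2, h3]
    congr 1
    rw [hcx (m % 256) (y.toNat % 256) (by omega) (by omega)]
  · rw [if_neg hx, if_neg hy]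
    set m := (-x - 1).toNat with hmdef
    set n := (-y - 1).toNat with hndef
    have h1 : ((m ^^^ n : Nat) : Int) % 256 = (((m ^^^ n) % 256 : Nat) : Int) := by omega
    rw [h1, hmod]
    have h2 : (x % 256).toNat = 255 - m % 256 := by omega
    have h3 : (y % 256).toNat = 255 - n % 256 := by omega
    rw [h2, h3]
    congr 1
    rw [hcx (m % 256) (255 - n % 256) (by omega) (by omega),
      Nat.xor_comm (m % 256) (255 - n % 256),
      hcx (n % 256) (m % 256) (by omega) (by omega)]
    have h4 : n % 256 ^^^ m % 256 = m % 256 ^^^ n % 256 := Nat.xor_comm _ _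
    rw [h4]
    have h5 : m % 256 ^^^ n % 256 < 256 := by
      have := Nat.xor_lt_two_pow (x := m % 256) (y := n % 256) (n := 8) (by norm_num; omega) (by norm_num; omega)
      norm_num at this
      omega
    omega

theorem pvNatBit15 (m : Nat) : m &&& 32768 = (m % 65536) &&& 32768 := by
  have h1 := Nat.and_two_pow m 15
  have h2 := Nat.and_two_pow (m % 65536) 15
  norm_num at h1 h2
  rw [h1, h2]
  have h3 : (m % 65536).testBit 15 = m.testBit 15 := by
    have := Nat.testBit_mod_two_pow m 16 15
    norm_num at this
    exact this
  rw [h3]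

theorem pvBandBit15 (x : Int) :
    PySem.Int.band x 32768 = (((x % 65536).toNat &&& 32768 : Nat) : Int) := by
  simp only [PySem.Int.band]
  by_cases hx : 0 ≤ x
  · rw [if_pos hx, if_pos (by norm_num : (0:Int) ≤ 32768)]
    have h0 : (32768 : Int).toNat = 32768 := rfl
    rw [h0]
    have h2 : (x % 65536).toNat = x.toNat % 65536 := by omega
    rw [h2, ← pvNatBit15]
  · rw [if_neg hx, if_pos (by norm_num : (0:Int) ≤ 32768)]
    have h0 : (32768 : Int).toNat = 32768 := rfl
    rw [h0]
    set m := (-x - 1).toNat with hmdef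
    have h2 : (x % 65536).toNat = 65535 - m % 65536 := by omega
    rw [h2]
    have hc : 65535 - m % 65536 = 65535 ^^^ (m % 65536) := by
      have := pvCompl 16 (m % 65536) (by norm_num; omega)
      norm_num at this
      omega
    rw [hc, Nat.and_xor_distrib_right]
    have h65 : (65535 : Nat) &&& 32768 = 32768 := by decide
    rw [h65, ← pvNatBit15]
    have h4 := Nat.and_two_pow m 15
    norm_num at h4
    rw [Nat.and_comm (32768 : Nat) m, h4]
    cases m.testBit 15 <;> simp
  
-- ---------- the step lemma: Int step = Nat step on the 16-bit residue ----------

theorem pvStepN_lt (c : Nat) : pvStepN c < 65536 := by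
  unfold pvStepN
  split <;> exact Nat.lt_succ_of_le Nat.and_le_right

theorem pvStepI_cast (x : Int) : pvStepI x = ((pvStepN ((x % 65536).toNat) : Nat) : Int) := by
  have hmask : ∀ m : Nat, m &&& 65535 = m % 65536 := pvMask16
  unfold pvStepI pvStepN
  rw [pvBandBit15 x]
  set c := (x % 65536).toNat with hcdef
  have hcond : (((c &&& 32768 : Nat) : Int) ≠ 0) ↔ (c &&& 32768 ≠ 0) := Int.natCast_ne_zero
  have hshift : x <<< (1 : Nat) = x * 2 := by
    rw [Int.shiftLeft_eq]; norm_num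
  have hcshift : c <<< 1 = c * 2 := by
    rw [Nat.shiftLeft_eq]
  have hx2 : ((x * 2) % 65536).toNat = (c * 2) % 65536 := by omega
  split
  case isTrue h =>
    rw [if_pos (hcond.mp h)]
    rw [pvBandMask16, pvBxorEmod16, hshift]
    have h4129 : ((4129 : Int) % 65536).toNat = 4129 := rfl
    rw [h4129, hx2]
    rw [Nat.and_xor_distrib_right, hmask, hmask, hcshift]
  case isFalse h =>
    rw [if_neg (fun h2 => h (hcond.mpr h2))]
    rw [pvBandMask16, hshift, hcshift, hmask]
    omega

theorem pvStepI_natCast (c : Nat) (hc : c < 65536) : pvStepI (c : Int) = ((pvStepN c : Nat) : Int) := by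
  have h : (((c : Int)) % 65536).toNat = c := by omega
  rw [pvStepI_cast, h]

theorem pvIter_natCast (n : Nat) : ∀ c : Nat, c < 65536 → pvStepI^[n] (c : Int) = ((pvIterN n c : Nat) : Int) := by
  induction n with
  | zero => intro c _; simp [pvIterN]
  | succ n ih =>
    intro c hc
    rw [Function.iterate_succ_apply, pvStepI_natCast c hc]
    exact ih _ (pvStepN_lt c)

theorem pvIter_cast (x : Int) : pvStepI^[8] x = ((pvIterN 8 ((x % 65536).toNat) : Nat) : Int) := by
  rw [Function.iterate_succ_apply, pvStepI_cast, pvIter_natCast 7 _ (pvStepN_lt _)]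
  rfl

theorem pvFoldlIgnore (g : Int → Int) (l : List Int) (x : Int) :
    l.foldl (fun c _ => g c) x = g^[l.length] x := by
  induction l generalizing x with
  | nil => rfl
  | cons a l ih => simp [List.foldl, ih, Function.iterate_succ_apply]

theorem pvInnerFold (x : Int) :
    (PySem.List.pyRange 0 8 1).foldl (fun c (_ : Int) =>
      if PySem.Int.band c 32768 ≠ 0 then
        PySem.Int.band (PySem.Int.bxor (c <<< (1 : Nat)) 4129) 65535
      else
        PySem.Int.band (c <<< (1 : Nat)) 65535) x
    = ((pvIterN 8 ((x % 65536).toNat) : Nat) : Int) := by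
  show (PySem.List.pyRange 0 8 1).foldl (fun c (_ : Int) => pvStepI c) x = _
  rw [pvFoldlIgnore]
  have hlen : (PySem.List.pyRange 0 8 1).length = 8 := by decide
  rw [hlen, pvIter_cast]

-- ---------- Nat core: linearity of the 8-step map and the table identity ----------

theorem pvStepN_eq (c : Nat) :
    pvStepN c = ((c <<< 1) &&& 65535) ^^^ (if c &&& 32768 ≠ 0 then 4129 else 0) := by
  unfold pvStepN
  split
  · rw [Nat.and_xor_distrib_right, (by decide : (4129 : Nat) &&& 65535 = 4129)]
  · rw [Nat.xor_zero]

theorem pvStepN_linear (a b : Nat) : pvStepN (a ^^^ b) = pvStepN a ^^^ pvStepN b := by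
  rw [pvStepN_eq, pvStepN_eq, pvStepN_eq, pvShiftLeftXor, Nat.and_xor_distrib_right]
  have hx : (a ^^^ b) &&& 32768 = (a &&& 32768) ^^^ (b &&& 32768) := Nat.and_xor_distrib_right
  have ha := Nat.and_two_pow a 15
  have hb := Nat.and_two_pow b 15
  norm_num at ha hb
  set A := (a <<< 1) &&& 65535
  set B := (b <<< 1) &&& 65535
  rw [hx, ha, hb]
  cases hta : a.testBit 15 <;> cases htb : b.testBit 15 <;> norm_num
  · exact Nat.xor_assoc A B 4129
  · exact pvXorPull A B 4129
  · exact (pvXorCancel A B 4129).symm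

theorem pvIterN_linear (n : Nat) : ∀ a b : Nat, pvIterN n (a ^^^ b) = pvIterN n a ^^^ pvIterN n b := by
  induction n with
  | zero => intro a b; rfl
  | succ n ih => intro a b; show pvIterN n _ = _; rw [pvStepN_linear, ih]; rfl

theorem pvIterN_low : ∀ (n c : Nat), n ≤ 16 → c < 2 ^ (16 - n) → pvIterN n c = c <<< n := by
  intro n
  induction n with
  | zero => intro c _ _; simp [pvIterN]
  | succ n ih =>
    intro c hn hc
    have h15 : c < 2 ^ 15 := lt_of_lt_of_le hc (Nat.pow_le_pow_right (by norm_num) (by omega))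
    have hcond : c &&& 32768 = 0 := by
      have := Nat.and_two_pow c 15
      norm_num at this
      rw [this, Nat.testBit_lt_two_pow (by norm_num; omega)]
      rfl
    have hstep : pvStepN c = 2 * c := by
      unfold pvStepN
      rw [if_neg (by simp [hcond])]
      rw [Nat.shiftLeft_eq]
      have hmask : ∀ m : Nat, m &&& 65535 = m % 65536 := pvMask16
      rw [hmask]
      have : c * 2 ^ 1 < 65536 := by norm_num; omega
      omega
    show pvIterN n (pvStepN c) = c <<< (n + 1)
    rw [hstep, ih (2 * c) (by omega) (by
      have h2 : 2 ^ (16 - n) = 2 * 2 ^ (16 - (n + 1)) := by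
        rw [← pow_succ']
        congr 1
        omega
      omega)]
    rw [Nat.shiftLeft_eq, Nat.shiftLeft_eq, pow_succ]
    ring

theorem pvCore (c b : Nat) (_hc : c < 65536) (_hb : b < 256) :
    pvIterN 8 (c ^^^ (b <<< 8)) = ((c <<< 8) &&& 65535) ^^^ pvIterN 8 (((c >>> 8) ^^^ b) <<< 8) := by
  have hmask8 : ∀ m : Nat, m &&& 255 = m % 256 := pvMask8
  have hmask16 : ∀ m : Nat, m &&& 65535 = m % 65536 := pvMask16
  have hh : c >>> 8 = c / 256 := by
    rw [Nat.shiftRight_eq_div_pow]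
  have hlo : c &&& 255 = c % 256 := hmask8 c
  -- decomposition of c
  have hdisj : ((c / 256) * 256) &&& (c % 256) = 0 := by
    have h1 : (c % 256) &&& 255 = c % 256 := by rw [hmask8]; omega
    have h2 : ((c / 256) * 256) &&& 255 = 0 := by rw [hmask8]; omega
    calc ((c / 256) * 256) &&& (c % 256)
        = ((c / 256) * 256) &&& (255 &&& (c % 256)) := by rw [Nat.and_comm 255 (c % 256), h1]
      _ = (((c / 256) * 256) &&& 255) &&& (c % 256) := by rw [Nat.and_assoc]
      _ = 0 := by rw [h2, Nat.zero_and]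
  have hdec : c = ((c >>> 8) <<< 8) ^^^ (c &&& 255) := by
    rw [hh, hlo, Nat.shiftLeft_eq]
    norm_num
    rw [pvXorAddOfAndZero _ _ hdisj]
    omega
  calc pvIterN 8 (c ^^^ (b <<< 8))
      = pvIterN 8 ((((c >>> 8) ^^^ b) <<< 8) ^^^ (c &&& 255)) := by
        conv_lhs => rw [hdec]
        rw [pvXorPull, pvShiftLeftXor]
    _ = pvIterN 8 (((c >>> 8) ^^^ b) <<< 8) ^^^ pvIterN 8 (c &&& 255) := by
        rw [pvIterN_linear]
    _ = pvIterN 8 (((c >>> 8) ^^^ b) <<< 8) ^^^ ((c &&& 255) <<< 8) := by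
        rw [pvIterN_low 8 (c &&& 255) (by norm_num) (by norm_num; rw [hlo]; omega)]
    _ = ((c <<< 8) &&& 65535) ^^^ pvIterN 8 (((c >>> 8) ^^^ b) <<< 8) := by
        rw [Nat.xor_comm]
        congr 1
        rw [hmask16, hlo, Nat.shiftLeft_eq, Nat.shiftLeft_eq]
        norm_num
        omega

-- ---------- the table ----------

theorem pvTable_lookup (h : Nat) (hh : h < 256) :
    PySem.List.pyGetD pvCrcTable ((h : Nat) : Int) 0 = pvCrcEntry ((h : Nat) : Int) := by
  unfold pvCrcTable
  rw [PySem.List.foldl_append_singleton_eq_map, List.nil_append]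
  have h256 : (256 : Int) = ((256 : Nat) : Int) := by norm_num
  have hr : PySem.List.pyRange 0 256 1 = PySem.List.pyRange 0 ((256 : Nat) : Int) := by
    rw [h256]
  rw [hr]
  exact PySem.List.pyGetD_map_pyRange pvCrcEntry 256 h 0 hh

theorem pvEntry_val (h : Nat) (hh : h < 256) :
    pvCrcEntry ((h : Nat) : Int) = ((pvIterN 8 (h <<< 8) : Nat) : Int) := by
  unfold pvCrcEntry
  rw [pvInnerFold]
  congr 2
  have hs : ((h : Int)) <<< (8 : Nat) = (h : Int) * 256 := by
    rw [Int.shiftLeft_eq]; norm_num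
  rw [hs, Nat.shiftLeft_eq]
  norm_num
  omega

-- ---------- per-byte step equality ----------

def pvAStep (crc byte : Int) : Int :=
  (PySem.List.pyRange 0 8 1).foldl (fun c (_ : Int) =>
    if PySem.Int.band c 32768 ≠ 0 then
      PySem.Int.band (PySem.Int.bxor (c <<< (1 : Nat)) 4129) 65535
    else
      PySem.Int.band (c <<< (1 : Nat)) 65535) (PySem.Int.bxor crc (byte <<< (8 : Nat)))

def pvBStep (crc byte : Int) : Int :=
  PySem.Int.bxor (PySem.Int.band (crc <<< (8 : Nat)) 65535)
    (PySem.List.pyGetD pvCrcTable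
      (PySem.Int.band (PySem.Int.bxor (crc >>> (8 : Nat)) byte) 255) 0)

theorem pvStepEq (crc byte : Int) : pvAStep crc byte = pvBStep crc byte := by
  unfold pvAStep pvBStep
  set C := (crc % 65536).toNat with hCdef
  set Bb := (byte % 256).toNat with hBdef
  have hC : C < 65536 := by omega
  have hBb : Bb < 256 := by omega
  have hshr : crc >>> (8 : Nat) = crc / 256 := by
    cases crc with
    | ofNat m =>
      show Int.ofNat (m >>> 8) = Int.ofNat m / 256
      rw [Nat.shiftRight_eq_div_pow]
      norm_num
    | negSucc m =>
      show Int.negSucc (m >>> 8) = Int.negSucc m / 256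
      rw [Nat.shiftRight_eq_div_pow]
      norm_num
      omega
  -- left side
  rw [pvInnerFold]
  have hA : ((PySem.Int.bxor crc (byte <<< (8 : Nat))) % 65536).toNat = C ^^^ (Bb <<< 8) := by
    rw [pvBxorEmod16]
    have h1 : ((byte <<< (8 : Nat)) % 65536).toNat = Bb <<< 8 := by
      rw [Int.shiftLeft_eq, Nat.shiftLeft_eq]
      norm_num
      omega
    rw [h1, hCdef]
    omega
  rw [hA]
  -- right side: the index
  set hn := (C >>> 8) ^^^ Bb with hndef
  have hCs : C >>> 8 = C / 256 := by rw [Nat.shiftRight_eq_div_pow]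
  have hhn : hn < 256 := by
    have := Nat.xor_lt_two_pow (x := C >>> 8) (y := Bb) (n := 8)
      (by norm_num; rw [hCs]; omega) (by norm_num; omega)
    norm_num at this
    omega
  have hidx : PySem.Int.band (PySem.Int.bxor (crc >>> (8 : Nat)) byte) 255 = ((hn : Nat) : Int) := by
    rw [pvBandMask8, pvBxorEmod8, hshr]
    have h1 : ((crc / 256) % 256).toNat = C >>> 8 := by rw [hCs]; omega
    rw [h1]
  rw [hidx, pvTable_lookup hn hhn, pvEntry_val hn hhn]
  have hB1 : PySem.Int.band (crc <<< (8 : Nat)) 65535 = (((C <<< 8) &&& 65535 : Nat) : Int) := by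
    rw [pvBandMask16, Int.shiftLeft_eq]
    have hmask16 : ∀ m : Nat, m &&& 65535 = m % 65536 := pvMask16
    rw [hmask16, Nat.shiftLeft_eq]
    omega
  rw [hB1, PySem.Int.bxor_natCast]
  exact_mod_cast congrArg (fun n : Nat => (n : Int)) (pvCore C Bb hC hBb)


theorem pvFunEq :
    (fun (crc byte : Int) =>
      let crc1 := PySem.Int.bxor crc (byte <<< (8 : Nat))
      (PySem.List.pyRange 0 8 1).foldl (fun crc _ =>
        if PySem.Int.band crc 32768 ≠ 0 then
          PySem.Int.band (PySem.Int.bxor (crc <<< (1 : Nat)) 4129) 65535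
        else
          PySem.Int.band (crc <<< (1 : Nat)) 65535) crc1)
    = (fun (crc byte : Int) =>
      PySem.Int.bxor (PySem.Int.band (crc <<< (8 : Nat)) 65535)
        (PySem.List.pyGetD pvCrcTable
          (PySem.Int.band (PySem.Int.bxor (crc >>> (8 : Nat)) byte) 255) 0)) := by
  funext c b
  show pvAStep c b = pvBStep c b
  exact pvStepEq c b

theorem pvMain (crc : Int) (data : List Int) : update_checksum crc data = update_checksum_alt crc data := by
  unfold update_checksum update_checksum_alt
  rw [pvFunEq]

-- ===== VERDICT (by name: the statement is the Claim_ definition above) =====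
theorem update_checksum_spec : Claim_equal_update_checksum := by
  intro crc data _
  show update_checksum crc data = update_checksum_alt crc data
  exact pvMain crc data
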